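-- pv_equiv track=rewrite | github.com/arekfu/t4_geom_convert | t4_geom_convert/Kernel/Surface/MacroBodies.py | parse_facet
-- ===== SOURCE A (Python) =====
-- def parse_facet(facet_int):
--     '''Convert an integer representing a facet into a tuple of its elements.
--
--     Polyhedron facets in the MCNP input are represented as integers. Each digit
--     represents the index of a vertex. For instance, the integer 1256
--     represents the facet bounded by vertices 1, 2, 5 and 6.
--
--     This function converts the integer representation into a tuple of indices,
--     which is more convenient to work with. For example:
--
--     >>> parse_facet(1256)
--     (0, 1, 4, 5)
--
--     Note that the resulting indices are zero-based, which is more suitable for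
--     Python.
--
--     Zeros are ignored:
--
--     >>> parse_facet(5230)
--     (4, 1, 2)
--     >>> parse_facet(7024)
--     (6, 1, 3)
--
--     :param int facet_int: the integer representing the facets
--     :returns: a tuple of indices
--     :rtype: tuple(int)
--     '''
--     indices = []
--     while facet_int != 0:
--         facet_int, digit = divmod(facet_int, 10)
--         facet_int, digit = int(facet_int), int(digit)
--         if digit != 0:
--             indices.append(digit - 1)
--     return tuple(reversed(indices))
-- ===== SOURCE B (Python) =====
-- def parse_facet(facet_int):
--     """Convert an integer representing a facet into a tuple of its elements.
--
--     Iterates the decimal string of the integer left-to-right, skipping '0'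
--     characters and emitting zero-based indices; no divmod loop, no reversal.
--     """
--     return tuple(int(c) - 1 for c in str(facet_int) if c != '0')
-- ===== Notes on version B (the rewrite author's own statement) =====
-- stated objective: idiomatic
-- what changed: B replaces the divmod accumulation loop plus final reversal with a single left-to-right pass over str(facet_int), skipping '0' characters and emitting int(c)-1 directly in order.
-- outside the precondition, e.g. on parse_facet(-1): A does not finish within the time limit, B raises ValueError
import Mathlib
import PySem

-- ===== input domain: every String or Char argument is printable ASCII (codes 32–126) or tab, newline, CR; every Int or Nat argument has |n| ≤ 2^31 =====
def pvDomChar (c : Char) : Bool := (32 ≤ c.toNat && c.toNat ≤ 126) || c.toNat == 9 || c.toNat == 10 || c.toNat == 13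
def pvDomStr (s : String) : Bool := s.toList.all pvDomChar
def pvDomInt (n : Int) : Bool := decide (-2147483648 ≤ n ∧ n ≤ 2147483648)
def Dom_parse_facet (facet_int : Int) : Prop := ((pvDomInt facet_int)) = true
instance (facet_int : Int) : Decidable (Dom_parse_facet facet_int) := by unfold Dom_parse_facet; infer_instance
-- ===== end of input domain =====

-- B replaces A's divmod loop plus final reversal with one left-to-right pass over str(facet_int)
-- (idiomatic); proved equal on all nonnegative inputs (A never returns on negative input).

-- ===== PORT A =====
-- the `while facet_int != 0` loop; the `facet_int < 0` test is only a totality guard: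
-- on negative input the Python loop never terminates (divmod floors, so the state reaches -1
-- and stays there), and such inputs are excluded by Pre_parse_facet.
def parseFacetLoop (facet_int : Int) (indices : List Int) : List Int :=
  if facet_int = 0 then indices
  else if facet_int < 0 then indices   -- unreachable under Pre_: Python diverges here
  else
    let q := PySem.Int.floordiv facet_int 10
    let digit := PySem.Int.mod facet_int 10
    parseFacetLoop q (if digit ≠ 0 then indices ++ [digit - 1] else indices)
termination_by facet_int.toNat
decreasing_by
  rename_i h0 hneg
  have h1 : 0 < facet_int := by omega
  have : PySem.Int.floordiv facet_int 10 = facet_int / 10 :=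
    PySem.Int.floordiv_eq_ediv_of_pos (by omega)
  rw [this]
  omega

def parse_facet (facet_int : Int) : List Int :=
  (parseFacetLoop facet_int []).reverse

-- ===== PORT B =====
-- tuple(int(c) - 1 for c in str(facet_int) if c != '0')
-- int(c) on the single digit character c is ported by hand as c.toNat - 48 (exact for the
-- digit characters '0'..'9' that str() of a nonnegative int produces).
def parse_facet_alt (facet_int : Int) : List Int :=
  ((PySem.Int.toStr facet_int).toList.filter (fun c => c ≠ '0')).map
    (fun c => (c.toNat : Int) - 48 - 1)

-- ===== PRECONDITION & SPEC =====
-- Pre_ excludes negative inputs: there Python A never returns (divmod floors toward -∞, so the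
-- loop state reaches -1 and stays), and B raises ValueError on the '-' character.
def Pre_parse_facet (facet_int : Int) : Prop := 0 ≤ facet_int
instance (facet_int : Int) : Decidable (Pre_parse_facet facet_int) := by
  unfold Pre_parse_facet; infer_instance

def pvWitness_parse_facet : Int := (1256)

def Spec_parse_facet (facet_int : Int) (out : List Int) : Prop := out = parse_facet_alt facet_int
instance (facet_int : Int) (out : List Int) : Decidable (Spec_parse_facet facet_int out) := by
  unfold Spec_parse_facet; infer_instance

-- ===== CLAIM (what is proved, stated in full; the proofs are below) =====
def Claim_equal_parse_facet : Prop := ∀ (facet_int : Int), Dom_parse_facet facet_int → Pre_parse_facet facet_int → Spec_parse_facet facet_int (parse_facet facet_int)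

-- ===== LEMMAS AND PROOFS =====

-- A's loop, on a nonnegative input, appends the nonzero base-10 digits (least significant first).
lemma parseFacetLoop_eq (m : Nat) : ∀ (acc : List Int),
    parseFacetLoop (m : Int) acc
      = acc ++ ((Nat.digits 10 m).filter (· ≠ 0)).map (fun (d : Nat) => (d : Int) - 1) := by
  induction m using Nat.strong_induction_on with
  | _ m ih =>
    intro acc
    rw [parseFacetLoop]
    by_cases h0 : (m : Int) = 0
    · have : m = 0 := by exact_mod_cast h0
      subst this; simp
    · have hm : 0 < m := by omega
      have hneg : ¬ ((m : Int) < 0) := by omega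
      simp only [h0, hneg, if_false]
      have hq : PySem.Int.floordiv (m : Int) 10 = ((m / 10 : Nat) : Int) :=
        PySem.Int.floordiv_natCast m 10
      have hr : PySem.Int.mod (m : Int) 10 = ((m % 10 : Nat) : Int) :=
        PySem.Int.mod_natCast m 10
      rw [hq, hr, ih (m / 10) (Nat.div_lt_self hm (by norm_num))]
      rw [Nat.digits_def' (by norm_num : 1 < 10) hm]
      by_cases hd : m % 10 = 0
      · simp [hd]
      · have hdvd : ¬ ((10:Int) ∣ (m : Int)) := by
          exact_mod_cast (by omega : ¬ ((10:Nat) ∣ m))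
        simp [hd, hdvd]

-- Nat.toDigits is the base-10 digit list, most significant first, rendered with digitChar.
lemma toDigitsCore_eq (f : Nat) : ∀ (n : Nat) (acc : List Char), n < f → n ≠ 0 →
    Nat.toDigitsCore 10 f n acc
      = ((Nat.digits 10 n).map Nat.digitChar).reverse ++ acc := by
  induction f with
  | zero => intro n acc h _; omega
  | succ f ih =>
    intro n acc hlt hn
    rw [Nat.toDigitsCore]
    by_cases hq : n / 10 = 0
    · have h10 : n < 10 := by omega
      have : Nat.digits 10 n = [n] := by
        rw [Nat.digits_def' (by norm_num : 1 < 10) (Nat.pos_of_ne_zero hn)]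
        simp [Nat.mod_eq_of_lt h10, hq]
      simp [hq, this, Nat.mod_eq_of_lt h10]
    · have hql : n / 10 < f := by
        have := Nat.div_lt_self (Nat.pos_of_ne_zero hn) (by norm_num : 1 < 10)
        omega
      simp only [hq, if_false]
      rw [ih (n / 10) _ hql hq]
      rw [Nat.digits_def' (by norm_num : 1 < 10) (Nat.pos_of_ne_zero hn)]
      simp [List.append_assoc]

lemma toChars_eq (m : Nat) (hm : m ≠ 0) :
    PySem.Int.toChars (m : Int)
      = ((Nat.digits 10 m).map Nat.digitChar).reverse := by
  have : ¬ ((m : Int) < 0) := by omega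
  simp only [PySem.Int.toChars, this, if_false, Int.toNat_natCast]
  rw [Nat.toDigits, toDigitsCore_eq (m + 1) m [] (by omega) hm, List.append_nil]

-- the two digit translations agree on actual base-10 digits
lemma digit_translate (d : Nat) (hd : d < 10) :
    ((Nat.digitChar d ≠ '0') ↔ (d ≠ 0))
    ∧ ((Nat.digitChar d).toNat : Int) - 48 - 1 = (d : Int) - 1 := by
  interval_cases d <;> simp <;> decide

-- ===== VERDICT (by name: the statement is the Claim_ definition above) =====
theorem parse_facet_spec : Claim_equal_parse_facet := by
  intro n _ hpre
  unfold Spec_parse_facet parse_facet parse_facet_alt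
  obtain ⟨m, rfl⟩ : ∃ m : Nat, n = (m : Int) := ⟨n.toNat, (Int.toNat_of_nonneg hpre).symm⟩
  rw [parseFacetLoop_eq m [], List.nil_append]
  by_cases hm : m = 0
  · subst hm; decide
  · rw [show (PySem.Int.toStr (m : Int)).toList = PySem.Int.toChars (m : Int) from
        PySem.Int.toList_toStr m, toChars_eq m hm]
    have hlt : ∀ d ∈ Nat.digits 10 m, d < 10 := fun d hd =>
      Nat.digits_lt_base (by norm_num) hd
    rw [← List.map_reverse, ← List.filter_reverse, ← List.map_reverse]
    generalize hL : (Nat.digits 10 m).reverse = L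
    have hlt' : ∀ d ∈ L, d < 10 := by
      intro d hd; exact hlt d (by rw [← hL] at hd; exact List.mem_reverse.mp hd)
    clear hL hlt
    induction L with
    | nil => simp
    | cons d t iht =>
      have hd : d < 10 := hlt' d List.mem_cons_self
      have ht := iht (fun x hx => hlt' x (List.mem_cons_of_mem d hx))
      obtain ⟨hiff, hval⟩ := digit_translate d hd
      by_cases hz : d = 0
      · subst hz
        simpa [List.filter_cons, Nat.digitChar] using ht
      · have hnz : Nat.digitChar d ≠ '0' := hiff.mpr hz
        simp [hz, hnz, hval]
        simpa using ht
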